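-- pv_equiv track=rewrite | github.com/tubs-alg/SampLNS | experiments/04_adaptive_seq_fixing/adaptive_seq_fixing_experiment.py | convert_sample_list_to_dicts
-- ===== SOURCE A (Python) =====
-- from typing import Dict, List
--
-- def convert_sample_list_to_dicts(
--     samples: List[List[str]],
-- ) -> List[Dict[str, bool]]:
--     """
--     Converts the original solution format of lists of selected features to a
--     dictionaries with the assignments of all mandatory features. This format
--     is used by the preprocessor (because we may replace a concrete feature by some
--     negated composite feature and this makes things more clearly).
--     """
--     features = list({f for s in samples for f in s})
--     sample_dicts = []
--     for sample in samples:
--         sample_dicts.append({f: f in sample for f in features})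
--     return sample_dicts
-- ===== SOURCE B (Python) =====
-- from typing import Dict, List
--
-- def convert_sample_list_to_dicts(
--     samples: List[List[str]],
-- ) -> List[Dict[str, bool]]:
--     features = list({f for s in samples for f in s})
--     sample_sets = [set(s) for s in samples]
--     columns = {f: [f in ss for ss in sample_sets] for f in features}
--     return [{f: columns[f][i] for f in features} for i in range(len(samples))]
-- ===== Notes on version B (the rewrite author's own statement) =====
-- stated objective: faster
-- what changed: B works column-wise: it converts each sample to a set once, builds for every feature a boolean membership column over all samples, and then transposes these columns into the per-sample dicts, instead of A's row-wise per-feature list-membership scan.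
import Mathlib
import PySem

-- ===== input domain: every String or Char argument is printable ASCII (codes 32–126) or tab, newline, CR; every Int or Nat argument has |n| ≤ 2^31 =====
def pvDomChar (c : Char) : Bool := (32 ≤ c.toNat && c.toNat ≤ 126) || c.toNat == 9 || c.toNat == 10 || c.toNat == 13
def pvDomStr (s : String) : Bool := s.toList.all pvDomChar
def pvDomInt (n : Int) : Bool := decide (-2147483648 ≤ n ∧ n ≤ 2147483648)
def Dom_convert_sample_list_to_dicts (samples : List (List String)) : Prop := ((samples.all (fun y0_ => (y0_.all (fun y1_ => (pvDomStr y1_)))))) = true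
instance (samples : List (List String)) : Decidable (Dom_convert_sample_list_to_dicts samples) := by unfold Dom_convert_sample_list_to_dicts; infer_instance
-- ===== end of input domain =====

-- B is column-wise: one membership-set per sample, a boolean column per feature, then a
-- transpose into per-sample dicts — replacing A's row-wise per-feature list-membership scan (faster).


-- ===== PORT A =====
-- features = list({f for s in samples for f in s}): the set is iterated in the
-- PySem.Set order (first occurrence); output dicts are compared ignoring order.
def convert_sample_list_to_dicts (samples : List (List String)) : List (List (String × Bool)) :=
  let features : List String := PySem.Set.ofList (samples.flatMap (fun s => s))
  samples.map (fun sample => features.map (fun f => (f, decide (f ∈ sample))))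

-- ===== PORT B =====
-- columns[f][i]: the index i ∈ range(len(samples)) is always in range, so Python never
-- raises; ported with the total pyGetD (default never used).
def convert_sample_list_to_dicts_alt (samples : List (List String)) : List (List (String × Bool)) :=
  let features : List String := PySem.Set.ofList (samples.flatMap (fun s => s))
  let sampleSets : List (PySem.Set String) := samples.map (fun s => PySem.Set.ofList s)
  let columns : PySem.Dict String (List Bool) :=
    PySem.Dict.mk (features.map (fun f => (f, sampleSets.map (fun ss => decide (f ∈ ss)))))
  (PySem.List.pyRange 0 (samples.length : Int) 1).map (fun i =>
    features.map (fun f => (f, PySem.List.pyGetD (columns.getD f []) i false)))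

-- ===== PRECONDITION & SPEC =====
def Spec_convert_sample_list_to_dicts (samples : List (List String)) (out : List (List (String × Bool))) : Prop := out = convert_sample_list_to_dicts_alt samples
instance (samples : List (List String)) (out : List (List (String × Bool))) : Decidable (Spec_convert_sample_list_to_dicts samples out) := by unfold Spec_convert_sample_list_to_dicts; infer_instance

-- ===== CLAIM =====
def Claim_equal_convert_sample_list_to_dicts : Prop := ∀ (samples : List (List String)), Dom_convert_sample_list_to_dicts samples → Spec_convert_sample_list_to_dicts samples (convert_sample_list_to_dicts samples)

-- ===== LEMMAS AND PROOFS =====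

-- Looking up a key present in a dict literal whose values are a function of the key.
theorem pv_getD_mk_map (ks : List String) (v : String → List Bool) (f : String)
    (hf : f ∈ ks) (d : List Bool) :
    (PySem.Dict.mk (ks.map (fun k => (k, v k)))).getD f d = v f := by
  induction ks with
  | nil => cases hf
  | cons k rest ih =>
    simp only [List.map_cons, PySem.Dict.getD, PySem.Dict.get?_mk_cons]
    by_cases h : k = f
    · simp [h]
    · have : f ∈ rest := by
        rcases List.mem_cons.mp hf with h' | h'
        · exact absurd h'.symm h
        · exact h'
      simpa [h] using ih this

-- ===== VERDICT =====
theorem convert_sample_list_to_dicts_spec : Claim_equal_convert_sample_list_to_dicts := by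
  intro samples _
  unfold Spec_convert_sample_list_to_dicts convert_sample_list_to_dicts convert_sample_list_to_dicts_alt
  simp only [PySem.List.pyRange_zero_nat, List.map_map]
  refine (List.ext_getElem (by simp) ?_).symm
  intro k hk hk'
  simp only [List.getElem_map, List.getElem_range, Function.comp]
  refine List.map_congr_left (fun f hf => ?_)
  rw [pv_getD_mk_map _ _ f hf]
  simp [PySem.Set.mem_ofList, List.getD_eq_getElem?_getD, List.getElem?_map,
    List.getElem?_eq_getElem (by simpa using hk' : k < samples.length)]
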